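-- pv_equiv track=rewrite | github.com/HumanCompatibleAI/learning_biases | learningbiases/run_benchmarks.py | flag_generator
-- ===== SOURCE A (Python) =====
-- def flag_generator(flags):
--     """Returns a generator that yields list of (flag, value) tuples."""
--     if not flags:
--         yield []
--         return
--
--     flag_name, flag_values = flags[0]
--     for value in flag_values:
--         for sublst in flag_generator(flags[1:]):
--             yield [(flag_name, value)] + sublst
-- ===== SOURCE B (Python) =====
-- def flag_generator(flags):
--     """Returns a generator that yields list of (flag, value) tuples."""
--     result = [[]]
--     for flag_name, flag_values in flags:
--         result = [combo + [(flag_name, value)]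
--                   for combo in result for value in flag_values]
--     yield from result
-- ===== Notes on version B (the rewrite author's own statement) =====
-- stated objective: alternative
-- what changed: Replaced the recursive generator (recursion on the first flag, rebuilding flags[1:] at each level) with an iterative fold that builds all combinations front-to-back in one loop over the flags.
import Mathlib
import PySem

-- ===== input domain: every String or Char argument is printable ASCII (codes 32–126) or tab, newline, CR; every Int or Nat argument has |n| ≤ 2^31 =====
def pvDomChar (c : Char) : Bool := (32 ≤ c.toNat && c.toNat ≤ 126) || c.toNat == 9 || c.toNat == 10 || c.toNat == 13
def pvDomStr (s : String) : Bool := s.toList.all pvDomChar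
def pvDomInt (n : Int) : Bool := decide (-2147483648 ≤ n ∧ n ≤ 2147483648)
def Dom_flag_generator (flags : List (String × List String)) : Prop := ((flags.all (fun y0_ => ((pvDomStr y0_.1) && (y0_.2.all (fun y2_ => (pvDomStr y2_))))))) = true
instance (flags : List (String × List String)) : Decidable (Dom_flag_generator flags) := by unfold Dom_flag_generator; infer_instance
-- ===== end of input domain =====

-- ===== PORT A =====
-- recursive: base case yields [[]]; otherwise each value of the first flag is
-- prepended to each combination of the remaining flags
def flag_generator (flags : List (String × List String)) : List (List (String × String)) :=
  match flags with
  | [] => [[]]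
  | (flag_name, flag_values) :: rest =>
      flag_values.flatMap (fun value =>
        (flag_generator rest).map (fun sublst => [(flag_name, value)] ++ sublst))

-- ===== PORT B =====
-- iterative fold: result starts as [[]] and each flag extends every combination
def flag_generator_alt (flags : List (String × List String)) : List (List (String × String)) :=
  flags.foldl
    (fun result fv =>
      result.flatMap (fun combo => fv.2.map (fun value => combo ++ [(fv.1, value)])))
    [[]]

-- ===== PRECONDITION & SPEC =====
def Spec_flag_generator (flags : List (String × List String)) (out : List (List (String × String))) : Prop := out = flag_generator_alt flags
instance (flags : List (String × List String)) (out : List (List (String × String))) : Decidable (Spec_flag_generator flags out) := by unfold Spec_flag_generator; infer_instance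

-- ===== CLAIM (what is proved, stated in full; the proofs are below) =====
def Claim_equal_flag_generator : Prop := ∀ (flags : List (String × List String)), Dom_flag_generator flags → Spec_flag_generator flags (flag_generator flags)

-- ===== LEMMAS AND PROOFS =====

-- ===== VERDICT (by name: the statement is the Claim_ definition above) =====
-- the fold with accumulator acc computes: every acc combination extended by every
-- combination produced by the recursion
theorem foldl_flag_gen (flags : List (String × List String))
    (acc : List (List (String × String))) :
    flags.foldl
      (fun result fv =>
        result.flatMap (fun combo => fv.2.map (fun value => combo ++ [(fv.1, value)])))
      acc
    = acc.flatMap (fun c => (flag_generator flags).map (fun s => c ++ s)) := by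
  induction flags generalizing acc with
  | nil => simp [flag_generator]
  | cons hd tl ih =>
      simp only [List.foldl_cons, ih, flag_generator]
      simp [List.flatMap_assoc, List.map_flatMap, List.flatMap_map, Function.comp_def]

theorem flag_generator_spec : Claim_equal_flag_generator := by
  intro flags _
  unfold Spec_flag_generator flag_generator_alt
  rw [foldl_flag_gen]
  simp
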